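-- pv_equiv track=rewrite | github.com/TitanicThompson1/FPRO | Práticas/triplet.py | triplet
-- ===== SOURCE A (Python) =====
-- def triplet(atuple):
--
--     for i in range(len(atuple)):
--         for j in range(i+1,len(atuple)):
--             for k in range(j+1,len(atuple)):
--                 soma=atuple[i]+atuple[j]+atuple[k]
--                 if soma==0:
--                     return (atuple[i],atuple[j],atuple[k])
--
--     return ()
-- ===== SOURCE B (Python) =====
-- def triplet(atuple):
--     n = len(atuple)
--     for i in range(n - 2):
--         cnt = {}
--         for x in atuple[i + 2:]:
--             cnt[x] = cnt.get(x, 0) + 1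
--         for j in range(i + 1, n - 1):
--             target = -(atuple[i] + atuple[j])
--             if cnt.get(target, 0) > 0:
--                 return (atuple[i], atuple[j], target)
--             cnt[atuple[j + 1]] -= 1
--     return ()
-- ===== Notes on version B (the rewrite author's own statement) =====
-- stated objective: faster
-- what changed: replaces the innermost linear scan for the third value by a hash-map multiset of the suffix atuple[j+1:], maintained by one decrement per j step, so B is O(n^2) instead of A's O(n^3)
import Mathlib
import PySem

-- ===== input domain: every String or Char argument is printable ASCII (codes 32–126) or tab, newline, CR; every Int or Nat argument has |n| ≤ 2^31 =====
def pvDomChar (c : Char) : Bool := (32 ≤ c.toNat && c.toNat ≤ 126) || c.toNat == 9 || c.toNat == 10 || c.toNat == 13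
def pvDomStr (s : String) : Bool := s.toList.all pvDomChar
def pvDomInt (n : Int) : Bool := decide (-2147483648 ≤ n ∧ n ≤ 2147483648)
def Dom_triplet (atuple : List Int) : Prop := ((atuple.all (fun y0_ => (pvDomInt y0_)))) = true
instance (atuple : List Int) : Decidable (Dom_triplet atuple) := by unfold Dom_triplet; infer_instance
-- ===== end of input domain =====

-- B replaces the innermost scan for the third element by a multiset (dict of counts) of the
-- suffix atuple[j+1:], maintained with one decrement per j step: O(n^2) instead of O(n^3).

-- ===== PORT A =====
def triplet (atuple : List Int) : List Int :=
  ((PySem.List.pyRange 0 (atuple.length : Int) 1).findSome? (fun i =>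
    (PySem.List.pyRange (i+1) (atuple.length : Int) 1).findSome? (fun j =>
      (PySem.List.pyRange (j+1) (atuple.length : Int) 1).findSome? (fun k =>
        let soma := PySem.List.pyGetD atuple i 0 + PySem.List.pyGetD atuple j 0 +
                    PySem.List.pyGetD atuple k 0
        if soma == 0 then
          some [PySem.List.pyGetD atuple i 0, PySem.List.pyGetD atuple j 0,
                PySem.List.pyGetD atuple k 0]
        else none)))).getD []

-- ===== PORT B =====
-- the 'for j in range(i+1, n-1)' loop of Source B, carrying the count dict cnt
def tripletAltLoopJ (atuple : List Int) (ai : Int) :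
    PySem.Dict Int Int → List Int → Option (List Int)
  | _, [] => none
  | cnt, j :: rest =>
    let aj := PySem.List.pyGetD atuple j 0
    let target := -(ai + aj)
    if 0 < cnt.getD target 0 then some [ai, aj, target]
    else
      let y := PySem.List.pyGetD atuple (j+1) 0
      tripletAltLoopJ atuple ai (cnt.insert y (cnt.getD y 0 - 1)) rest

def triplet_alt (atuple : List Int) : List Int :=
  ((PySem.List.pyRange 0 ((atuple.length : Int) - 2) 1).findSome? (fun i =>
    let cnt := (PySem.List.slice atuple (some (i+2)) none).foldl
      (fun d x => d.insert x (d.getD x 0 + 1)) PySem.Dict.empty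
    tripletAltLoopJ atuple (PySem.List.pyGetD atuple i 0) cnt
      (PySem.List.pyRange (i+1) ((atuple.length : Int) - 1) 1))).getD []

-- ===== PRECONDITION & SPEC =====
def Spec_triplet (atuple : List Int) (out : List Int) : Prop := out = triplet_alt atuple
instance (atuple : List Int) (out : List Int) : Decidable (Spec_triplet atuple out) := by unfold Spec_triplet; infer_instance

-- ===== CLAIM (what is proved, stated in full; the proofs are below) =====
def Claim_equal_triplet : Prop := ∀ (atuple : List Int), Dom_triplet atuple → Spec_triplet atuple (triplet atuple)

-- ===== LEMMAS AND PROOFS =====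

lemma findSome?_congr_mem {α β : Type} (l : List α) (f g : α → Option β)
    (h : ∀ x ∈ l, f x = g x) : l.findSome? f = l.findSome? g := by
  induction l with
  | nil => rfl
  | cons a t ih =>
    simp only [List.findSome?_cons, h a (by simp)]
    cases g a with
    | none => exact ih (fun x hx => h x (by simp [hx]))
    | some b => rfl

lemma findSome?_eq_none_of_forall {α β : Type} (l : List α) (f : α → Option β)
    (h : ∀ x ∈ l, f x = none) : l.findSome? f = none := by
  rw [List.findSome?_eq_none_iff]; exact h

-- the linear scan for a value x with ai+aj+x = 0 is a membership test
lemma scan_eq_mem (l : List Int) (ai aj : Int) :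
    l.findSome? (fun x => if ai + aj + x == 0 then some [ai, aj, x] else none) =
      (if -(ai + aj) ∈ l then some [ai, aj, -(ai + aj)] else none) := by
  induction l with
  | nil => simp
  | cons x t ih =>
    by_cases hx : ai + aj + x = 0
    · have : x = -(ai + aj) := by omega
      subst this
      simp
    · simp only [List.findSome?_cons, List.mem_cons]
      rw [if_neg (by simpa using hx), ih]
      have hne : ¬(-aj + -ai = x) := by omega
      simp [hne]

-- A's inner k-loop over indices equals the scan over the suffix list
lemma aInner_eq (atuple : List Int) (ai : Int) (j : Int) (hj : 0 ≤ j) :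
    (PySem.List.pyRange (j+1) (atuple.length : Int) 1).findSome? (fun k =>
      if ai + PySem.List.pyGetD atuple j 0 + PySem.List.pyGetD atuple k 0 == 0 then
        some [ai, PySem.List.pyGetD atuple j 0, PySem.List.pyGetD atuple k 0]
      else none) =
    (if -(ai + PySem.List.pyGetD atuple j 0) ∈ atuple.drop (j+1).toNat
     then some [ai, PySem.List.pyGetD atuple j 0, -(ai + PySem.List.pyGetD atuple j 0)]
     else none) := by
  rw [← scan_eq_mem (atuple.drop (j+1).toNat) ai (PySem.List.pyGetD atuple j 0),
      ← PySem.List.map_pyGetD_pyRange' atuple 0 (show (0:Int) ≤ j + 1 by omega),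
      List.findSome?_map]
  rfl

-- the j-loop with the count invariant equals A's j/k double loop
lemma loopJ_eq (atuple : List Int) (ai : Int) :
    ∀ (d : Nat) (m : Int) (cnt : PySem.Dict Int Int),
      0 ≤ m →
      ((atuple.length : Int) - 1 - m).toNat = d →
      (∀ x, cnt.getD x 0 = ((atuple.drop (m+1).toNat).count x : Int)) →
      tripletAltLoopJ atuple ai cnt (PySem.List.pyRange m ((atuple.length : Int) - 1) 1) =
        (PySem.List.pyRange m (atuple.length : Int) 1).findSome? (fun j =>
          (PySem.List.pyRange (j+1) (atuple.length : Int) 1).findSome? (fun k =>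
            if ai + PySem.List.pyGetD atuple j 0 + PySem.List.pyGetD atuple k 0 == 0 then
              some [ai, PySem.List.pyGetD atuple j 0, PySem.List.pyGetD atuple k 0]
            else none)) := by
  intro d
  induction d with
  | zero =>
    intro m cnt hm hd hinv
    rw [PySem.List.pyRange_one_eq_nil (show (atuple.length : Int) - 1 ≤ m by omega)]
    symm
    apply findSome?_eq_none_of_forall
    intro j hj
    have hj' := (PySem.List.mem_pyRange_one).1 hj
    rw [PySem.List.pyRange_one_eq_nil (show (atuple.length : Int) ≤ j + 1 by omega)]
    rfl
  | succ d ih =>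
    intro m cnt hm hd hinv
    have hlt : m < (atuple.length : Int) - 1 := by omega
    rw [PySem.List.pyRange_one_cons hlt,
        PySem.List.pyRange_one_cons (show m < (atuple.length : Int) by omega)]
    simp only [tripletAltLoopJ, List.findSome?_cons]
    rw [aInner_eq atuple ai m hm]
    have htarget := hinv (-(ai + PySem.List.pyGetD atuple m 0))
    by_cases hmem : -(ai + PySem.List.pyGetD atuple m 0) ∈ atuple.drop (m+1).toNat
    · have hpos : 0 < cnt.getD (-(ai + PySem.List.pyGetD atuple m 0)) 0 := by
        rw [htarget]; exact_mod_cast List.count_pos_iff.2 hmem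
      rw [if_pos hpos, if_pos hmem]
    · have hzero : ¬ 0 < cnt.getD (-(ai + PySem.List.pyGetD atuple m 0)) 0 := by
        rw [htarget, List.count_eq_zero.mpr hmem]; omega
      rw [if_neg hzero, if_neg hmem]
      apply ih (m+1) _ (by omega) (by omega)
      intro x
      have hidx : (m+1).toNat < atuple.length := by omega
      have hdrop : atuple.drop (m+1).toNat =
          atuple[(m+1).toNat] :: atuple.drop ((m+1).toNat + 1) := List.drop_eq_getElem_cons hidx
      have hy : PySem.List.pyGetD atuple (m+1) 0 = atuple[(m+1).toNat] :=
        PySem.List.pyGetD_eq_getElem atuple 0 (by omega) (by omega)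
      have h2 : (m+1+1).toNat = (m+1).toNat + 1 := by omega
      rw [PySem.Dict.getD_insert, h2]
      by_cases hxy : x = PySem.List.pyGetD atuple (m+1) 0
      · rw [if_pos hxy, hinv (PySem.List.pyGetD atuple (m+1) 0), hdrop, hxy, hy,
            List.count_cons_self]
        push_cast
        omega
      · rw [if_neg hxy, hinv x, hdrop,
            List.count_cons_of_ne (by rw [hy] at hxy; exact fun h => hxy h.symm)]

-- A's per-i body (the j/k double loop) is none when i ≥ n-2
lemma aBody_eq_none (atuple : List Int) (i : Int)
    (hi : (atuple.length : Int) - 2 ≤ i) :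
    (PySem.List.pyRange (i+1) (atuple.length : Int) 1).findSome? (fun j =>
      (PySem.List.pyRange (j+1) (atuple.length : Int) 1).findSome? (fun k =>
        if PySem.List.pyGetD atuple i 0 + PySem.List.pyGetD atuple j 0 +
           PySem.List.pyGetD atuple k 0 == 0 then
          some [PySem.List.pyGetD atuple i 0, PySem.List.pyGetD atuple j 0,
                PySem.List.pyGetD atuple k 0]
        else none)) = none := by
  apply findSome?_eq_none_of_forall
  intro j hj
  have hj' := (PySem.List.mem_pyRange_one).1 hj
  rw [PySem.List.pyRange_one_eq_nil (show (atuple.length : Int) ≤ j + 1 by omega)]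
  rfl

-- B's per-i body equals A's per-i body, for 0 ≤ i
lemma bBody_eq_aBody (atuple : List Int) (i : Int) (h0 : 0 ≤ i) :
    tripletAltLoopJ atuple (PySem.List.pyGetD atuple i 0)
      ((PySem.List.slice atuple (some (i+2)) none).foldl
        (fun d x => d.insert x (d.getD x 0 + 1)) PySem.Dict.empty)
      (PySem.List.pyRange (i+1) ((atuple.length : Int) - 1) 1) =
    (PySem.List.pyRange (i+1) (atuple.length : Int) 1).findSome? (fun j =>
      (PySem.List.pyRange (j+1) (atuple.length : Int) 1).findSome? (fun k =>
        if PySem.List.pyGetD atuple i 0 + PySem.List.pyGetD atuple j 0 +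
           PySem.List.pyGetD atuple k 0 == 0 then
          some [PySem.List.pyGetD atuple i 0, PySem.List.pyGetD atuple j 0,
                PySem.List.pyGetD atuple k 0]
        else none)) := by
  apply loopJ_eq atuple (PySem.List.pyGetD atuple i 0)
      (((atuple.length : Int) - 1 - (i+1)).toNat) (i+1) _ (by omega) rfl
  intro x
  rw [PySem.List.slice_from atuple (show (0:Int) ≤ i + 2 by omega),
      PySem.Dict.foldl_insert_getD_add_one_eq_counter, PySem.Dict.getD_counter,
      show ((i:Int) + 1 + 1).toNat = ((i:Int) + 2).toNat from by omega]

-- ===== VERDICT (by name: the statement is the Claim_ definition above) =====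
theorem triplet_spec : Claim_equal_triplet := by
  intro atuple _
  unfold Spec_triplet triplet triplet_alt
  congr 1
  by_cases hn : 2 ≤ (atuple.length : Int)
  · rw [PySem.List.pyRange_one_append 0 ((atuple.length : Int) - 2) (atuple.length : Int)
        (by omega) (by omega), List.findSome?_append]
    rw [findSome?_eq_none_of_forall (PySem.List.pyRange ((atuple.length : Int) - 2)
        (atuple.length : Int) 1) _ (fun i hi =>
          aBody_eq_none atuple i (((PySem.List.mem_pyRange_one).1 hi).1))]
    rw [Option.or_none]
    apply findSome?_congr_mem
    intro i hi
    have hi' := (PySem.List.mem_pyRange_one).1 hi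
    exact (bBody_eq_aBody atuple i hi'.1).symm
  · rw [PySem.List.pyRange_one_eq_nil (show (atuple.length : Int) - 2 ≤ 0 by omega)]
    apply findSome?_eq_none_of_forall
    intro i hi
    have hi' := (PySem.List.mem_pyRange_one).1 hi
    exact aBody_eq_none atuple i (by omega)
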